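-- pv_equiv track=rewrite | github.com/silogen/ai-workloads | workloads/aim-fine-tuning/aimtrain-dataprep-verl/helm/mount/hf_dataset_to_parquet.py | normalize_preserve_fields
-- ===== SOURCE A (Python) =====
-- from typing import Any, Dict, List, cast
--
-- def normalize_preserve_fields(raw_fields: List[str]) -> List[str]:
--     fields: List[str] = []
--     for item in raw_fields:
--         for chunk in item.split(","):
--             chunk = chunk.strip()
--             if chunk:
--                 fields.append(chunk)
--     return fields
-- ===== SOURCE B (Python) =====
-- from typing import List
--
--
-- def normalize_preserve_fields(raw_fields: List[str]) -> List[str]: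
--     # Character-level tokenizer: one state machine per item; `cur` holds the
--     # committed token text, `pend` holds whitespace not yet known to be interior.
--     out: List[str] = []
--     for item in raw_fields:
--         cur = ""
--         pend = ""
--         for c in item + ",":
--             if c == ",":
--                 if cur:
--                     out.append(cur)
--                 cur = ""
--                 pend = ""
--             elif c.isspace():
--                 if cur:
--                     pend += c
--             else:
--                 cur = cur + pend + c
--                 pend = ""
--     return out
-- ===== Notes on version B (the rewrite author's own statement) =====
-- stated objective: alternative
-- what changed: Replaces A's split/strip/filter pipeline with a character-level state machine: a single scan over each item's characters that builds tokens with a committed-text buffer and a pending-whitespace buffer, flushing on commas, so no split or strip function is ever called.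
import Mathlib
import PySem

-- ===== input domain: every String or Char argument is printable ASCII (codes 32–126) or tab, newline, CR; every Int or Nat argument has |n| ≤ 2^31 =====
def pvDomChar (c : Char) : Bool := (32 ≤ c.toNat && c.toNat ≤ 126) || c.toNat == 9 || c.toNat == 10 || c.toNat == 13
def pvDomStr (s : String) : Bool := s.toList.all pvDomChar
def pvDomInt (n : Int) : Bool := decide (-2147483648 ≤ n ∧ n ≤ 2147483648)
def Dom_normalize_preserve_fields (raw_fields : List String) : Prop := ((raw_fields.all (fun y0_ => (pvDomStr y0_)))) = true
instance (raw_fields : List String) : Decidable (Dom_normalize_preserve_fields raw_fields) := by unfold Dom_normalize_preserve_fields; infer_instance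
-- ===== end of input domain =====

-- B replaces A's split/strip/filter pipeline with a character-level state machine (committed-text and pending-whitespace buffers, flush on comma); objective: alternative algorithm. Return values are proved equal; no side effects involved.

-- ===== PORT A =====
-- item.split(",") is ported via PySem.Chars.splitOn (exact for the nonempty separator ",").
def normalize_preserve_fields (raw_fields : List String) : List String :=
  raw_fields.foldl (fun fields item =>
    ((PySem.Chars.splitOn item.toList [',']).map String.ofList).foldl (fun fields chunk =>
      let chunk := PySem.Str.strip chunk
      if chunk ≠ "" then fields ++ [chunk] else fields) fields) []

-- ===== PORT B =====
-- one step of Source B's inner character loop: state = (out, cur, pend)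
def npfStep (st : List String × List Char × List Char) (c : Char) :
    List String × List Char × List Char :=
  match st with
  | (out, cur, pend) =>
    if c = ',' then
      (if cur ≠ [] then out ++ [String.ofList cur] else out, [], [])
    else if PySem.Chars.isspace c then
      (out, cur, if cur ≠ [] then pend ++ [c] else pend)
    else
      (out, cur ++ pend ++ [c], [])

-- for item in raw_fields: cur = ""; pend = ""; for c in item + ",": … (the appended ',' flushes the last token)
def normalize_preserve_fields_alt (raw_fields : List String) : List String :=
  raw_fields.foldl (fun out item =>
    ((item.toList ++ [',']).foldl npfStep (out, [], [])).1) []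

-- ===== PRECONDITION & SPEC =====
def Spec_normalize_preserve_fields (raw_fields : List String) (out : List String) : Prop := out = normalize_preserve_fields_alt raw_fields
instance (raw_fields : List String) (out : List String) : Decidable (Spec_normalize_preserve_fields raw_fields out) := by unfold Spec_normalize_preserve_fields; infer_instance

-- ===== CLAIM (what is proved, stated in full; the proofs are below) =====
def Claim_equal_normalize_preserve_fields : Prop := ∀ (raw_fields : List String), Dom_normalize_preserve_fields raw_fields → Spec_normalize_preserve_fields raw_fields (normalize_preserve_fields raw_fields)

-- ===== LEMMAS AND PROOFS =====

-- simple structural recursion equal to splitting on a single character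
def split1 (c : Char) : List Char → List (List Char)
  | [] => [[]]
  | x :: xs => if x = c then [] :: split1 c xs else (split1 c xs).modifyHead (x :: ·)

theorem split1_ne_nil (c : Char) (l : List Char) : split1 c l ≠ [] := by
  cases l with
  | nil => simp [split1]
  | cons x xs =>
    simp only [split1]
    split_ifs
    · simp
    · cases h : split1 c xs with
      | nil => exact absurd h (split1_ne_nil c xs)
      | cons a as => simp

theorem splitOn_go_eq (c : Char) (fuel : Nat) :
    ∀ (l cur : List Char) (acc : List (List Char)), l.length < fuel →
    PySem.Chars.splitOn.go [c] fuel l cur acc =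
      acc.reverse ++ (split1 c l).modifyHead (cur.reverse ++ ·) := by
  induction fuel with
  | zero => intro l cur acc h; omega
  | succ n ih =>
    intro l cur acc h
    cases l with
    | nil => simp [PySem.Chars.splitOn.go, split1]
    | cons x xs =>
      simp only [PySem.Chars.splitOn.go]
      by_cases hx : x = c
      · subst hx
        have hpre : [x].isPrefixOf (x :: xs) = true := by simp [List.isPrefixOf]
        rw [if_pos hpre]
        simp only [List.length_cons, List.length_nil, List.drop_succ_cons, List.drop_zero]
        rw [ih xs [] ((cur.reverse) :: acc) (by simpa using Nat.lt_of_succ_lt_succ h)]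
        simp only [split1, if_pos rfl, List.reverse_nil, List.nil_append, List.reverse_cons,
          List.append_assoc, List.singleton_append, List.modifyHead_cons]
        cases hs : split1 x xs with
        | nil => exact absurd hs (split1_ne_nil x xs)
        | cons a as => simp
      · have hpre : [c].isPrefixOf (x :: xs) = false := by
          simp [List.isPrefixOf]
          exact fun hc => absurd hc.symm hx
        rw [if_neg (by simp [hpre])]
        rw [ih xs (x :: cur) acc (by simpa using Nat.lt_of_succ_lt_succ h)]
        simp only [split1, if_neg hx, List.modifyHead_modifyHead]
        congr 1
        cases hs : split1 c xs with
        | nil => exact absurd hs (split1_ne_nil c xs)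
        | cons a as => simp

theorem splitOn_single (c : Char) (cs : List Char) :
    PySem.Chars.splitOn cs [c] = split1 c cs := by
  unfold PySem.Chars.splitOn
  rw [splitOn_go_eq c (cs.length + 1) cs [] [] (by omega)]
  cases hs : split1 c cs with
  | nil => exact absurd hs (split1_ne_nil c cs)
  | cons a as => simp

theorem split1_append (c : Char) (a b : List Char) :
    split1 c (a ++ c :: b) = split1 c a ++ split1 c b := by
  induction a with
  | nil => simp [split1]
  | cons x xs ih =>
    simp only [List.cons_append, split1, ih]
    split_ifs
    · simp
    · cases hs : split1 c xs with
      | nil => exact absurd hs (split1_ne_nil c xs)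
      | cons y ys => simp

theorem split1_nocomma (c : Char) (l : List Char) (h : c ∉ l) : split1 c l = [l] := by
  induction l with
  | nil => simp [split1]
  | cons x xs ih =>
    simp only [split1]
    rw [if_neg (by intro hx; exact h (hx ▸ List.mem_cons_self ..))]
    rw [ih (fun hm => h (List.mem_cons_of_mem _ hm))]
    simp

theorem inner_foldl (chunks fields : List String) :
    chunks.foldl (fun fields chunk =>
      let chunk := PySem.Str.strip chunk
      if chunk ≠ "" then fields ++ [chunk] else fields) fields =
    fields ++ (chunks.map PySem.Str.strip).filter (fun c => c ≠ "") := by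
  induction chunks generalizing fields with
  | nil => simp
  | cons x xs ih =>
    simp only [List.foldl_cons, List.map_cons, List.filter_cons, ih]
    by_cases hx : PySem.Str.strip x ≠ ""
    · simp [hx]
    · simp at hx; simp [hx]

def itemOut (l : List Char) : List String :=
  (((split1 ',' l).map String.ofList).map PySem.Str.strip).filter (fun c => c ≠ "")

theorem outer_foldl (l : List String) (acc : List String) :
    l.foldl (fun fields item =>
      ((PySem.Chars.splitOn item.toList [',']).map String.ofList).foldl (fun fields chunk =>
        let chunk := PySem.Str.strip chunk
        if chunk ≠ "" then fields ++ [chunk] else fields) fields) acc =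
    acc ++ l.flatMap (fun item => itemOut item.toList) := by
  induction l generalizing acc with
  | nil => simp
  | cons x xs ih =>
    simp only [List.foldl_cons]
    rw [inner_foldl, splitOn_single, ih]
    simp [itemOut, List.flatMap_cons, List.append_assoc]

-- B-side lemmas: the state machine computes itemOut

theorem strip_ofList (l : List Char) :
    PySem.Str.strip (String.ofList l) = String.ofList (PySem.Chars.strip l) := by
  simp [PySem.Str.strip]

theorem ofList_ne_empty_iff (l : List Char) : (String.ofList l ≠ "") ↔ l ≠ [] := by
  constructor
  · intro h hl; exact h (by simp [hl])
  · intro h he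
    exact h (by simpa using congrArg String.toList he)

theorem rstrip_cons (c : Char) (cs : List Char) :
    PySem.Chars.rstrip (c :: cs) =
      if PySem.Chars.rstrip cs = [] then
        (if PySem.Chars.isspace c then [] else [c])
      else c :: PySem.Chars.rstrip cs := by
  simp only [PySem.Chars.rstrip, List.reverse_cons, List.dropWhile_append]
  by_cases h : (List.dropWhile PySem.Chars.isspace cs.reverse) = []
  · simp only [h, List.isEmpty_nil, if_pos, List.reverse_eq_nil_iff.mpr h, List.reverse_nil]
    simp only [List.dropWhile_cons, List.dropWhile_nil]
    by_cases hc : PySem.Chars.isspace c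
    · simp [hc]
    · simp [hc]
  · have hne : (List.dropWhile PySem.Chars.isspace cs.reverse).reverse ≠ [] := by
      simpa using h
    simp only [List.isEmpty_eq_false_iff_exists_mem.mpr
      (List.exists_mem_of_ne_nil _ h)]
    simp [hne, h]

theorem strip_cons_ws (c : Char) (cs : List Char) (h : PySem.Chars.isspace c = true) :
    PySem.Chars.strip (c :: cs) = PySem.Chars.strip cs := by
  simp [PySem.Chars.strip, PySem.Chars.lstrip, List.dropWhile_cons, h]

theorem strip_cons_not_ws (c : Char) (cs : List Char) (h : ¬ PySem.Chars.isspace c = true) :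
    PySem.Chars.strip (c :: cs) = c :: PySem.Chars.rstrip cs := by
  have hl : PySem.Chars.lstrip (c :: cs) = c :: cs := by
    simp [PySem.Chars.lstrip, List.dropWhile_cons, h]
  rw [show PySem.Chars.strip (c :: cs) = PySem.Chars.rstrip (PySem.Chars.lstrip (c :: cs)) from rfl,
    hl, rstrip_cons]
  by_cases h1 : PySem.Chars.rstrip cs = [] <;> simp [h, h1]

-- one-token result of a comma-free run
def filt1 (l : List Char) : List String :=
  if PySem.Chars.strip l = [] then [] else [String.ofList (PySem.Chars.strip l)]

theorem machine_run_nonempty (l : List Char) (hl : ',' ∉ l) :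
    ∀ (out : List String) (cur pend : List Char), cur ≠ [] →
    (l ++ [',']).foldl npfStep (out, cur, pend) =
      (out ++ [String.ofList (cur ++ (if PySem.Chars.rstrip l = [] then [] else pend ++ PySem.Chars.rstrip l))], [], []) := by
  induction l with
  | nil =>
    intro out cur pend hcur
    simp [npfStep, hcur, PySem.Chars.rstrip]
  | cons c cs ih =>
    intro out cur pend hcur
    have hc : c ≠ ',' := fun h => hl (h ▸ List.mem_cons_self ..)
    have hcs : ',' ∉ cs := fun h => hl (List.mem_cons_of_mem _ h)
    simp only [List.cons_append, List.foldl_cons]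
    by_cases hws : PySem.Chars.isspace c
    · rw [show npfStep (out, cur, pend) c = (out, cur, pend ++ [c]) from by
        simp [npfStep, hc, hws, hcur]]
      rw [ih hcs out cur (pend ++ [c]) hcur, rstrip_cons]
      by_cases hr : PySem.Chars.rstrip cs = []
      · simp [hr, hws]
      · simp [hr, hws]
    · rw [show npfStep (out, cur, pend) c = (out, cur ++ pend ++ [c], []) from by
        simp [npfStep, hc, hws]]
      rw [ih hcs out (cur ++ pend ++ [c]) [] (by simp), rstrip_cons]
      by_cases hr : PySem.Chars.rstrip cs = []
      · simp [hr, hws]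
      · simp [hr, hws]

theorem machine_run (l : List Char) (hl : ',' ∉ l) (out : List String) :
    (l ++ [',']).foldl npfStep (out, [], []) = (out ++ filt1 l, [], []) := by
  induction l generalizing out with
  | nil =>
    simp [npfStep, filt1, PySem.Chars.strip, PySem.Chars.lstrip, PySem.Chars.rstrip]
  | cons c cs ih =>
    have hc : c ≠ ',' := fun h => hl (h ▸ List.mem_cons_self ..)
    have hcs : ',' ∉ cs := fun h => hl (List.mem_cons_of_mem _ h)
    simp only [List.cons_append, List.foldl_cons]
    by_cases hws : PySem.Chars.isspace c
    · rw [show npfStep (out, [], []) c = (out, [], []) from by simp [npfStep, hc, hws]]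
      rw [ih hcs out]
      rw [filt1, filt1, strip_cons_ws c cs hws]
    · rw [show npfStep (out, [], []) c = (out, [c], []) from by simp [npfStep, hc, hws]]
      rw [machine_run_nonempty cs hcs out [c] [] (by simp)]
      rw [filt1, strip_cons_not_ws c cs hws]
      by_cases hr : PySem.Chars.rstrip cs = []
      · simp [hr]
      · simp [hr]

theorem filt_decomp (a b : List Char) (ha : ',' ∉ a) :
    itemOut (a ++ ',' :: b) = filt1 a ++ itemOut b := by
  unfold itemOut
  rw [split1_append, split1_nocomma ',' a ha]
  simp only [List.map_append, List.filter_append, List.map_cons, List.map_nil,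
    List.filter_cons, List.filter_nil]
  congr 1
  rw [strip_ofList]
  unfold filt1
  by_cases h : PySem.Chars.strip a = []
  · simp [h]
  · have : String.ofList (PySem.Chars.strip a) ≠ "" := (ofList_ne_empty_iff _).mpr h
    simp [h, this]

theorem exists_comma_decomp (l : List Char) (h : ',' ∈ l) :
    ∃ a b, l = a ++ ',' :: b ∧ ',' ∉ a := by
  induction l with
  | nil => simp at h
  | cons c cs ih =>
    by_cases hc : c = ','
    · exact ⟨[], cs, by simp [hc], by simp⟩
    · have : ',' ∈ cs := by
        rcases List.mem_cons.mp h with h1 | h1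
        · exact absurd h1.symm hc
        · exact h1
      obtain ⟨a, b, hab, hna⟩ := ih this
      exact ⟨c :: a, b, by simp [hab], by
        simp only [List.mem_cons, not_or]
        exact ⟨fun hx => hc hx.symm, hna⟩⟩

theorem machine_item (n : Nat) : ∀ (l : List Char), l.count ',' = n → ∀ (out : List String),
    (l ++ [',']).foldl npfStep (out, [], []) = (out ++ itemOut l, [], []) := by
  induction n with
  | zero =>
    intro l hn out
    have hnm : ',' ∉ l := by
      rw [← List.count_eq_zero]; exact hn
    rw [machine_run l hnm out]
    unfold itemOut
    rw [split1_nocomma ',' l hnm]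
    simp only [List.map_cons, List.map_nil, List.filter_cons, List.filter_nil]
    rw [strip_ofList]
    unfold filt1
    by_cases h : PySem.Chars.strip l = []
    · simp [h]
    · have : String.ofList (PySem.Chars.strip l) ≠ "" := (ofList_ne_empty_iff _).mpr h
      simp [h, this]
  | succ n ih =>
    intro l hn out
    have hmem : ',' ∈ l := by
      rw [← List.count_pos_iff]; omega
    obtain ⟨a, b, hab, hna⟩ := exists_comma_decomp l hmem
    subst hab
    have hb : b.count ',' = n := by
      have := hn
      rw [List.count_append, List.count_cons_self, List.count_eq_zero.mpr hna] at this
      omega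
    have : (a ++ ',' :: b) ++ [','] = (a ++ [',']) ++ (b ++ [',']) := by simp
    rw [this, List.foldl_append, machine_run a hna out, ih b hb (out ++ filt1 a)]
    rw [filt_decomp a b hna, List.append_assoc]

theorem alt_eq (raw_fields : List String) :
    normalize_preserve_fields_alt raw_fields =
      raw_fields.flatMap (fun item => itemOut item.toList) := by
  unfold normalize_preserve_fields_alt
  have main : ∀ (l : List String) (acc : List String),
      l.foldl (fun out item => ((item.toList ++ [',']).foldl npfStep (out, [], [])).1) acc =
        acc ++ l.flatMap (fun item => itemOut item.toList) := by
    intro l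
    induction l with
    | nil => simp
    | cons x xs ih =>
      intro acc
      simp only [List.foldl_cons]
      rw [machine_item (x.toList.count ',') x.toList rfl acc]
      rw [ih]
      simp [List.append_assoc]
  rw [main]
  simp

-- ===== VERDICT (by name: the statement is the Claim_ definition above) =====
theorem normalize_preserve_fields_spec : Claim_equal_normalize_preserve_fields := by
  intro raw_fields _
  show normalize_preserve_fields raw_fields = normalize_preserve_fields_alt raw_fields
  rw [alt_eq]
  unfold normalize_preserve_fields
  rw [outer_foldl]
  simp
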